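-- pv_equiv track=rewrite | github.com/Prit-Pathak/Python-DSA | CODE-AND-DEBUG/11.String_ASCII/Assignment/q7.py | is_asterisk
-- ===== SOURCE A (Python) =====
-- def is_asterisk(s: str) -> str:
--     res = ""
--     vow = "aeiouAEIUO"
--     for ch in s:
--         if ("a" <= ch <= "z" or "A" <= ch <= "Z") and ch not in vow:
--             res += chr(42)
--         else:
--             res += ch
--     return res
-- ===== SOURCE B (Python) =====
-- def is_asterisk(s: str) -> str:
--     vow = "aeiouAEIUO"
--
--     def cons(c):
--         return ("a" <= c <= "z" or "A" <= c <= "Z") and c not in vow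
--
--     chunks = []
--     i = 0
--     n = len(s)
--     while i < n:
--         j = i
--         if cons(s[i]):
--             while j < n and cons(s[j]):
--                 j += 1
--             chunks.append("*" * (j - i))
--         else:
--             while j < n and not cons(s[j]):
--                 j += 1
--             chunks.append(s[i:j])
--         i = j
--     return "".join(chunks)
-- ===== Notes on version B (the rewrite author's own statement) =====
-- stated objective: alternative
-- what changed: Instead of a per-character branch appending one char at a time, B scans the string as maximal runs of consonants / non-consonants with two pointers and emits whole chunks (an asterisk repeated for the run length, or an untouched slice), joined once at the end.
import Mathlib
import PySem

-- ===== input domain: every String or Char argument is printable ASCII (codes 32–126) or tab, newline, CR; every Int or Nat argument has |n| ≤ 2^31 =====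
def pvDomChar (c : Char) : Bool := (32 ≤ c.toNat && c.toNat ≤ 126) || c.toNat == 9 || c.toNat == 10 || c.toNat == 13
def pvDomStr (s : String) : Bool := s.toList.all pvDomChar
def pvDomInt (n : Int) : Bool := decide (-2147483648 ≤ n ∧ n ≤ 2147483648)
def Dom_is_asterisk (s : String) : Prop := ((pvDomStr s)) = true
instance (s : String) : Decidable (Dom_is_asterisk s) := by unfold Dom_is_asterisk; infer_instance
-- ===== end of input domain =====

-- B replaces A's per-character branch-and-append loop with a two-pointer scan over
-- maximal consonant / non-consonant runs, emitting whole chunks; objective: alternative.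

-- ===== PORT A =====
-- literal transliteration of A: accumulate res over the characters of s
def is_asterisk (s : String) : String :=
  s.toList.foldl
    (fun res ch =>
      if (('a' ≤ ch ∧ ch ≤ 'z') ∨ ('A' ≤ ch ∧ ch ≤ 'Z')) ∧ ch ∉ "aeiouAEIUO".toList
      then res ++ String.ofList [Char.ofNat 42]
      else res ++ String.ofList [ch])
    ""

-- ===== PORT B =====
-- B's helper cons(c)
def pvConsB (c : Char) : Bool :=
  (('a' ≤ c && c ≤ 'z') || ('A' ≤ c && c ≤ 'Z')) && !("aeiouAEIUO".toList.contains c)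

-- B's outer while loop over the remaining suffix; each inner `while j < n and …`
-- advancing j is the takeWhile/dropWhile split; each iteration appends one chunk
def pvRunsB (l : List Char) : List String :=
  match l with
  | [] => []
  | c :: rest =>
    if pvConsB c then
      String.ofList (List.replicate ((rest.takeWhile pvConsB).length + 1) '*')
        :: pvRunsB (rest.dropWhile pvConsB)
    else
      String.ofList (c :: rest.takeWhile (fun x => !pvConsB x))
        :: pvRunsB (rest.dropWhile (fun x => !pvConsB x))
termination_by l.length
decreasing_by
  · exact Nat.lt_succ_of_le (List.length_dropWhile_le _ _)
  · exact Nat.lt_succ_of_le (List.length_dropWhile_le _ _)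

-- "".join(chunks)
def is_asterisk_alt (s : String) : String :=
  String.join (pvRunsB s.toList)

-- ===== PRECONDITION & SPEC =====
def Spec_is_asterisk (s : String) (out : String) : Prop := out = is_asterisk_alt s
instance (s : String) (out : String) : Decidable (Spec_is_asterisk s out) := by unfold Spec_is_asterisk; infer_instance

-- ===== CLAIM (what is proved, stated in full; the proofs are below) =====
def Claim_equal_is_asterisk : Prop := ∀ (s : String), Dom_is_asterisk s → Spec_is_asterisk s (is_asterisk s)

-- ===== LEMMAS AND PROOFS =====

-- the per-character map both sides compute
def pvMapC (c : Char) : Char := if pvConsB c then '*' else c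

theorem pv_consB_iff (c : Char) :
    pvConsB c = true ↔
      ((('a' ≤ c ∧ c ≤ 'z') ∨ ('A' ≤ c ∧ c ≤ 'Z')) ∧ c ∉ "aeiouAEIUO".toList) := by
  simp [pvConsB]

theorem pv_foldl_str (l : List String) (acc : String) :
    l.foldl (· ++ ·) acc = acc ++ l.foldl (· ++ ·) "" := by
  induction l generalizing acc with
  | nil => simp
  | cons h t ih =>
    simp only [List.foldl_cons]
    rw [ih (acc ++ h), ih ("" ++ h), String.append_assoc]
    simp

theorem pv_join_cons (x : String) (xs : List String) :
    String.join (x :: xs) = x ++ String.join xs := by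
  simp only [String.join, List.foldl_cons]
  rw [pv_foldl_str]
  simp

-- A's loop builds acc ++ the character-wise image
theorem pv_A_foldl (l : List Char) (acc : String) :
    l.foldl
      (fun res ch =>
        if (('a' ≤ ch ∧ ch ≤ 'z') ∨ ('A' ≤ ch ∧ ch ≤ 'Z')) ∧ ch ∉ "aeiouAEIUO".toList
        then res ++ String.ofList [Char.ofNat 42]
        else res ++ String.ofList [ch])
      acc = acc ++ String.ofList (l.map pvMapC) := by
  induction l generalizing acc with
  | nil =>
    apply String.ext
    simp
  | cons h t ih =>
    simp only [List.foldl_cons, List.map_cons]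
    rw [ih]
    by_cases hc : (('a' ≤ h ∧ h ≤ 'z') ∨ ('A' ≤ h ∧ h ≤ 'Z')) ∧ h ∉ "aeiouAEIUO".toList
    · rw [if_pos hc]
      have hb : pvConsB h = true := (pv_consB_iff h).mpr hc
      have hm : pvMapC h = Char.ofNat 42 := by simp [pvMapC, hb]
      apply String.ext
      simp [hm]
    · rw [if_neg hc]
      have hb : pvConsB h = false := by
        rcases hh : pvConsB h with _ | _
        · rfl
        · exact absurd ((pv_consB_iff h).mp hh) hc
      have hm : pvMapC h = h := by simp [pvMapC, hb]
      apply String.ext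
      simp [hm]

-- B's run decomposition joins to the character-wise image
theorem pv_B_runs (l : List Char) :
    String.join (pvRunsB l) = String.ofList (l.map pvMapC) := by
  induction hn : l.length using Nat.strong_induction_on generalizing l with
  | _ n ih =>
    match l with
    | [] =>
      rw [pvRunsB]
      apply String.ext
      simp [String.join]
    | c :: rest =>
      rw [pvRunsB]
      by_cases hc : pvConsB c
      · rw [if_pos hc, pv_join_cons]
        have hdrop : (rest.dropWhile pvConsB).length < n := by
          subst hn
          exact Nat.lt_succ_of_le (List.length_dropWhile_le _ _)
        rw [ih _ hdrop _ rfl]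
        have hsplit : rest = rest.takeWhile pvConsB ++ rest.dropWhile pvConsB :=
          (List.takeWhile_append_dropWhile).symm
        have htake : (rest.takeWhile pvConsB).map pvMapC =
            List.replicate (rest.takeWhile pvConsB).length '*' := by
          apply List.eq_replicate_iff.mpr
          refine ⟨by simp, ?_⟩
          intro b hb
          obtain ⟨x, hx, he⟩ := List.mem_map.mp hb
          have hcx := List.mem_takeWhile_imp hx
          rw [← he]; simp [pvMapC, hcx]
        apply String.ext
        simp only [String.toList_append, String.toList_ofList]
        calc List.replicate ((rest.takeWhile pvConsB).length + 1) '*'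
              ++ (rest.dropWhile pvConsB).map pvMapC
            = ('*' :: List.replicate (rest.takeWhile pvConsB).length '*')
              ++ (rest.dropWhile pvConsB).map pvMapC := by
              rw [List.replicate_succ]
          _ = pvMapC c :: ((rest.takeWhile pvConsB).map pvMapC
              ++ (rest.dropWhile pvConsB).map pvMapC) := by
              rw [htake]; simp [pvMapC, hc]
          _ = (c :: rest).map pvMapC := by
              rw [← List.map_append, ← hsplit, List.map_cons]
      · rw [if_neg hc, pv_join_cons]
        have hdrop : (rest.dropWhile (fun x => !pvConsB x)).length < n := by
          subst hn
          exact Nat.lt_succ_of_le (List.length_dropWhile_le _ _)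
        rw [ih _ hdrop _ rfl]
        have hsplit : rest = rest.takeWhile (fun x => !pvConsB x)
            ++ rest.dropWhile (fun x => !pvConsB x) :=
          (List.takeWhile_append_dropWhile).symm
        have htake : (rest.takeWhile (fun x => !pvConsB x)).map pvMapC =
            rest.takeWhile (fun x => !pvConsB x) := by
          refine (List.map_congr_left ?_).trans (List.map_id _)
          intro x hx
          have hcx := List.mem_takeWhile_imp hx
          simp only [Bool.not_eq_eq_eq_not, Bool.not_true] at hcx
          simp [pvMapC, hcx]
        apply String.ext
        simp only [String.toList_append, String.toList_ofList]
        calc (c :: rest.takeWhile (fun x => !pvConsB x))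
              ++ (rest.dropWhile (fun x => !pvConsB x)).map pvMapC
            = pvMapC c :: ((rest.takeWhile (fun x => !pvConsB x)).map pvMapC
              ++ (rest.dropWhile (fun x => !pvConsB x)).map pvMapC) := by
              rw [htake]; simp [pvMapC, hc]
          _ = (c :: rest).map pvMapC := by
              rw [← List.map_append, ← hsplit, List.map_cons]

-- ===== VERDICT (by name: the statement is the Claim_ definition above) =====
theorem is_asterisk_spec : Claim_equal_is_asterisk := by
  intro s _
  unfold Spec_is_asterisk is_asterisk is_asterisk_alt
  rw [pv_A_foldl, pv_B_runs]
  apply String.ext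
  simp
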